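-- pv_equiv track=rewrite | github.com/lampa-research/flatland-rl | flatland/utils/directed_tiles.py | transition_to_binary
-- ===== SOURCE A (Python) =====
-- def transition_to_binary(transition):
--     # Translate the ascii transition description in the format  "NE WS" to the
--     # binary list of transitions as per RailEnv - NESW (in) x NESW (out)
--     directions = list("NESW")
--     transition_16_bit = ["0"] * 16
--     for sTran in transition.split(" "):
--         if len(sTran) == 2:
--             in_direction = directions.index(sTran[0])
--             out_direction = directions.index(sTran[1])
--             transition_idx = 4 * in_direction + out_direction
--             transition_16_bit[transition_idx] = "1"
--     transition_16_bit_string = "".join(transition_16_bit)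
--     return int(transition_16_bit_string, 2)
-- ===== SOURCE B (Python) =====
-- def transition_to_binary(transition):
--     # Scan the 16 (in, out) direction pairs MSB-first and test set membership,
--     # instead of placing bits into a 16-char string and parsing it base 2.
--     tokens = set(transition.split(" "))
--     result = 0
--     for din in "NESW":
--         for dout in "NESW":
--             result = 2 * result + (1 if din + dout in tokens else 0)
--     return result
-- ===== Notes on version B (the rewrite author's own statement) =====
-- stated objective: simpler
-- what changed: Instead of resolving each token to an index via directions.index, writing ones into a 16-element character list and parsing the joined string base 2, B builds a set of tokens once and scans the 16 (in,out) direction pairs most-significant-first, accumulating the integer directly as result = 2*result + membership bit; no .index calls, no bit string, no base-2 parse.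
import Mathlib
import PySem

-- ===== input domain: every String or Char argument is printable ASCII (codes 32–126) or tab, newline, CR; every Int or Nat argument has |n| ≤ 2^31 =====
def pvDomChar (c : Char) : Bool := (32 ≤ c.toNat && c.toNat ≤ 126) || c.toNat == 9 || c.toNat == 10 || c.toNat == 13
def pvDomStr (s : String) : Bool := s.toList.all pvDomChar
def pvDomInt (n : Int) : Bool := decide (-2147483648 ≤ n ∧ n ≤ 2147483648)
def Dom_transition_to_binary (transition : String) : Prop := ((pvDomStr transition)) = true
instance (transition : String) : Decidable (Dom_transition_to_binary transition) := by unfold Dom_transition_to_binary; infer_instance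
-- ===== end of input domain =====

-- B replaces A's index-placement into a 16-char bit string (+ base-2 parse) by an MSB-first
-- scan of the 16 direction pairs with a set-membership test; return value only, no mutation.
-- Strings are handled as their code-point lists (the PySem.Chars representation, exact here).

-- ===== PORT A =====
def pvDirs : List Char := ['N', 'E', 'S', 'W']

-- one iteration of A's loop body (sTran and the bit "strings" as char lists)
def pvStepA (bits : List (List Char)) (sTran : List Char) : List (List Char) :=
  if PySem.Chars.len sTran = 2 then
    match PySem.List.pyGet? sTran 0, PySem.List.pyGet? sTran 1 with
    | some c0, some c1 =>
      match PySem.List.index? pvDirs c0, PySem.List.index? pvDirs c1 with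
      | some in_direction, some out_direction =>
          PySem.List.pySetD bits (4 * (in_direction : Int) + (out_direction : Int)) ['1']
      | _, _ => bits          -- Python raises ValueError here; excluded by Pre_
    | _, _ => bits            -- unreachable when len sTran = 2
  else bits

def transition_to_binary (transition : String) : Int :=
  let bits := (PySem.Chars.splitOn transition.toList [' ']).foldl pvStepA (List.replicate 16 ['0'])
  let s := PySem.Chars.join [] bits
  -- int(s, 2): exact hand port for strings of '0'/'1' digits, which s always is here
  s.foldl (fun acc c => 2 * acc + (if c = '1' then (1 : Int) else 0)) 0

-- ===== PORT B =====
def transition_to_binary_alt (transition : String) : Int :=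
  let tokens : PySem.Set (List Char) := PySem.Set.ofList (PySem.Chars.splitOn transition.toList [' '])
  "NESW".toList.foldl (fun acc din =>
    "NESW".toList.foldl (fun acc2 dout =>
      2 * acc2 + (if PySem.Set.contains tokens [din, dout] then (1 : Int) else 0))
      acc) 0

-- ===== PRECONDITION & SPEC =====
-- Pre_ excludes exactly the inputs where A raises ValueError: a length-2 token with a
-- character that is not one of the four direction letters makes directions.index raise.
def Pre_transition_to_binary (transition : String) : Prop :=
  ((PySem.Chars.splitOn transition.toList [' ']).all
    (fun t => t.length ≠ 2 || t.all (fun c => pvDirs.contains c))) = true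
instance (transition : String) : Decidable (Pre_transition_to_binary transition) := by
  unfold Pre_transition_to_binary; infer_instance
def pvWitness_transition_to_binary : String := "NE WS"

def Spec_transition_to_binary (transition : String) (out : Int) : Prop :=
  out = transition_to_binary_alt transition
instance (transition : String) (out : Int) : Decidable (Spec_transition_to_binary transition out) := by
  unfold Spec_transition_to_binary; infer_instance

-- ===== CLAIM (what is proved, stated in full; the proofs are below) =====
def Claim_equal_transition_to_binary : Prop := ∀ (transition : String), Dom_transition_to_binary transition → Pre_transition_to_binary transition → Spec_transition_to_binary transition (transition_to_binary transition)

-- ===== LEMMAS AND PROOFS =====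

-- the index a token contributes to, if any (mirrors one guarded iteration of A's loop)
def pvTokIdx (t : List Char) : Option Nat :=
  match t with
  | [c0, c1] =>
    match PySem.List.index? pvDirs c0, PySem.List.index? pvDirs c1 with
    | some i, some o => some (4 * i + o)
    | _, _ => none
  | _ => none

-- the canonical token for position k < 16
def pvPair (k : Nat) : List Char := [pvDirs[k / 4]!, pvDirs[k % 4]!]

lemma pvStepA_eq (bits : List (List Char)) (t : List Char) :
    pvStepA bits t = match pvTokIdx t with
      | some k => bits.set k ['1']
      | none => bits := by
  unfold pvStepA pvTokIdx
  simp only [PySem.List.index?_eq_idxOf?]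
  rcases t with _ | ⟨c0, _ | ⟨c1, _ | ⟨c2, rest⟩⟩⟩
  · simp [PySem.Chars.len]
  · simp [PySem.Chars.len]
  · rcases hi : List.idxOf? c0 pvDirs with _ | i <;>
      rcases ho : List.idxOf? c1 pvDirs with _ | o <;>
      simp [PySem.Chars.len, PySem.List.pyGet?, PySem.List.pyIdx?, hi, ho]
    rw [PySem.List.pySetD_of_nonneg]
    congr 1
    omega
  · simp [PySem.Chars.len]
    exact fun hf => absurd hf (by omega)

lemma pvTokIdx_lt (t : List Char) (k : Nat) (h : pvTokIdx t = some k) : k < 16 := by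
  unfold pvTokIdx at h
  simp only [PySem.List.index?_eq_idxOf?] at h
  rcases t with _ | ⟨c0, _ | ⟨c1, _ | ⟨c2, rest⟩⟩⟩ <;> try simp at h
  rcases hi : List.idxOf? c0 pvDirs with _ | i <;>
    rcases ho : List.idxOf? c1 pvDirs with _ | o <;> rw [hi, ho] at h <;> simp at h
  obtain ⟨hi4, -⟩ := PySem.List.getElem_of_index?_eq_some (by simpa [PySem.List.index?_eq_idxOf?] using hi)
  obtain ⟨ho4, -⟩ := PySem.List.getElem_of_index?_eq_some (by simpa [PySem.List.index?_eq_idxOf?] using ho)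
  simp [pvDirs] at hi4 ho4
  omega

lemma foldl_char (l : List (List Char)) (bits : List (List Char)) (h : bits.length = 16) :
    (l.foldl pvStepA bits).length = 16 ∧
    ∀ k, (l.foldl pvStepA bits)[k]? =
      if (∃ t ∈ l, pvTokIdx t = some k) then (if k < 16 then some ['1'] else none) else bits[k]? := by
  induction l generalizing bits with
  | nil => simp [h]
  | cons t l ih =>
    rw [List.foldl_cons, pvStepA_eq]
    rcases hidx : pvTokIdx t with _ | j
    · obtain ⟨h1, h2⟩ := ih bits h
      refine ⟨h1, fun k => ?_⟩
      rw [h2 k]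
      have : (∃ t' ∈ t :: l, pvTokIdx t' = some k) ↔ (∃ t' ∈ l, pvTokIdx t' = some k) := by
        constructor
        · rintro ⟨t', ht', hk⟩
          rcases List.mem_cons.mp ht' with rfl | ht'
          · simp [hidx] at hk
          · exact ⟨t', ht', hk⟩
        · rintro ⟨t', ht', hk⟩; exact ⟨t', List.mem_cons_of_mem _ ht', hk⟩
      rw [if_congr this rfl rfl]
    · have hj : j < 16 := pvTokIdx_lt t j hidx
      obtain ⟨h1, h2⟩ := ih (bits.set j ['1']) (by simp [h])
      refine ⟨h1, fun k => ?_⟩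
      rw [h2 k, List.getElem?_set]
      by_cases hrest : ∃ t' ∈ l, pvTokIdx t' = some k
      · simp [hrest]
      · by_cases hk : j = k
        · subst hk
          simp [hrest, h, hj, hidx]
        · simp [hrest, hk, hidx]

lemma pvTokIdx_pvPair : ∀ k < 16, pvTokIdx (pvPair k) = some k := by decide

lemma pvTokIdx_eq_pair (t : List Char) (k : Nat) (h : pvTokIdx t = some k) : t = pvPair k := by
  unfold pvTokIdx at h
  simp only [PySem.List.index?_eq_idxOf?] at h
  rcases t with _ | ⟨c0, _ | ⟨c1, _ | ⟨c2, rest⟩⟩⟩ <;> try simp at h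
  rcases hi : List.idxOf? c0 pvDirs with _ | i <;>
    rcases ho : List.idxOf? c1 pvDirs with _ | o <;> rw [hi, ho] at h <;> simp at h
  obtain ⟨hi4, hie, -⟩ := PySem.List.getElem_of_index?_eq_some (by simpa [PySem.List.index?_eq_idxOf?] using hi)
  obtain ⟨ho4, hoe, -⟩ := PySem.List.getElem_of_index?_eq_some (by simpa [PySem.List.index?_eq_idxOf?] using ho)
  have hL : pvDirs.length = 4 := by decide
  rw [hL] at hi4 ho4
  have hdiv : k / 4 = i := by omega
  have hmod : k % 4 = o := by omega
  unfold pvPair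
  rw [hdiv, hmod, getElem!_pos pvDirs i (by omega), getElem!_pos pvDirs o (by omega), hie, hoe]

lemma mem_iff_exists_tokIdx (l : List (List Char)) (k : Nat) (hk : k < 16) :
    (∃ t ∈ l, pvTokIdx t = some k) ↔ pvPair k ∈ l := by
  constructor
  · rintro ⟨t, ht, hidx⟩
    rw [pvTokIdx_eq_pair t k hidx] at ht; exact ht
  · intro h
    exact ⟨pvPair k, h, pvTokIdx_pvPair k hk⟩

lemma bits_eq (l : List (List Char)) :
    l.foldl pvStepA (List.replicate 16 ['0']) =
      (List.range 16).map (fun k => if pvPair k ∈ l then ['1'] else ['0']) := by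
  obtain ⟨h1, h2⟩ := foldl_char l (List.replicate 16 ['0']) (by simp)
  apply List.ext_getElem?
  intro k
  rw [h2 k, List.getElem?_map]
  have hr : (List.range 16)[k]? = if k < 16 then some k else none := by
    by_cases h : k < 16 <;> simp [h]
  have hrep : (List.replicate 16 (['0'] : List Char))[k]? = if k < 16 then some ['0'] else none :=
    List.getElem?_replicate
  rw [hr, hrep]
  by_cases hk : k < 16
  · rw [if_congr (mem_iff_exists_tokIdx l k hk) rfl rfl]
    by_cases hm : pvPair k ∈ l <;> simp [hm, hk]
  · have hno : ¬ (∃ t ∈ l, pvTokIdx t = some k) := by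
      rintro ⟨t, -, hidx⟩; exact hk (pvTokIdx_lt t k hidx)
    simp [hno, hk]

-- ===== VERDICT (by name: the statement is the Claim_ definition above) =====
set_option maxRecDepth 4000 in
theorem transition_to_binary_spec : Claim_equal_transition_to_binary := by
  intro transition _ _
  unfold Spec_transition_to_binary transition_to_binary transition_to_binary_alt
  dsimp only
  rw [bits_eq]
  set L := PySem.Chars.splitOn transition.toList [' '] with hLdef
  have hmap : (List.range 16).map (fun k => if pvPair k ∈ L then ['1'] else ['0'])
      = ((List.range 16).map (fun k => if pvPair k ∈ L then '1' else '0')).map (fun c => [c]) := by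
    rw [List.map_map]
    exact List.map_congr_left
      (fun k _ => by by_cases h : pvPair k ∈ L <;> simp [h, Function.comp])
  rw [hmap, PySem.Chars.join_nil_singletons, List.foldl_map]
  have hfun : (fun (acc : Int) (k : Nat) =>
        2 * acc + if (if pvPair k ∈ L then '1' else '0') = '1' then (1 : Int) else 0)
      = (fun (acc : Int) (k : Nat) => 2 * acc + if pvPair k ∈ L then (1 : Int) else 0) := by
    funext acc k
    split <;> simp
  rw [hfun]
  have hm : ∀ s : List Char, PySem.Set.contains (PySem.Set.ofList L) s = decide (s ∈ L) := by
    intro s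
    by_cases h : s ∈ L <;> simp [PySem.Set.mem_ofList, h]
  have hs : "NESW".toList = ['N', 'E', 'S', 'W'] := rfl
  have hrange : List.range 16 = [0, 1, 2, 3, 4, 5, 6, 7, 8, 9, 10, 11, 12, 13, 14, 15] := rfl
  have hp0 : pvPair 0 = ['N', 'N'] := rfl
  have hp1 : pvPair 1 = ['N', 'E'] := rfl
  have hp2 : pvPair 2 = ['N', 'S'] := rfl
  have hp3 : pvPair 3 = ['N', 'W'] := rfl
  have hp4 : pvPair 4 = ['E', 'N'] := rfl
  have hp5 : pvPair 5 = ['E', 'E'] := rfl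
  have hp6 : pvPair 6 = ['E', 'S'] := rfl
  have hp7 : pvPair 7 = ['E', 'W'] := rfl
  have hp8 : pvPair 8 = ['S', 'N'] := rfl
  have hp9 : pvPair 9 = ['S', 'E'] := rfl
  have hp10 : pvPair 10 = ['S', 'S'] := rfl
  have hp11 : pvPair 11 = ['S', 'W'] := rfl
  have hp12 : pvPair 12 = ['W', 'N'] := rfl
  have hp13 : pvPair 13 = ['W', 'E'] := rfl
  have hp14 : pvPair 14 = ['W', 'S'] := rfl
  have hp15 : pvPair 15 = ['W', 'W'] := rfl
  simp only [hs, hrange, hm, List.foldl_cons, List.foldl_nil, decide_eq_true_eq, hp0, hp1, hp2, hp3, hp4, hp5, hp6, hp7, hp8, hp9, hp10, hp11, hp12, hp13, hp14, hp15]
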